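-- pv_equiv track=rewrite | github.com/Aozaki-Rito/splendor | agents/rule_based_agent.py | select_gems_to_discard
-- ===== SOURCE A (Python) =====
-- from typing import Any, Dict, List, Optional
--
-- def select_gems_to_discard(game_state: Dict[str, Any], gems: Dict[str, int], num_to_discard: int) -> Dict[str, int]:
--     """优先丢弃数量最多且非黄金的宝石。"""
--     discarded: Dict[str, int] = {}
--     remaining = dict(gems)
--     colors = sorted(
--         [color for color, count in remaining.items() if count > 0 and color != "gold"],
--         key=lambda color: (-remaining[color], color),
--     )
--     while num_to_discard > 0 and colors:
--         color = colors[0]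
--         discarded[color] = discarded.get(color, 0) + 1
--         remaining[color] -= 1
--         num_to_discard -= 1
--         colors = sorted(
--             [c for c, count in remaining.items() if count > 0 and c != "gold"],
--             key=lambda c: (-remaining[c], c),
--         )
--     return discarded
-- ===== SOURCE B (Python) =====
-- from typing import Any, Dict, List, Optional
--
--
-- def _insort(items: List, pair) -> None:
--     """Insert pair into a lex-sorted list of (neg_count, color) pairs, keeping it sorted."""
--     i = 0
--     while i < len(items) and items[i] < pair:
--         i += 1
--     items.insert(i, pair)
--
--
-- def select_gems_to_discard(game_state: Dict[str, Any], gems: Dict[str, int], num_to_discard: int) -> Dict[str, int]: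
--     """优先丢弃数量最多且非黄金的宝石。
--
--     Maintains one sorted list of (-count, color) pairs incrementally (pop the
--     head, re-insert the decremented pair) instead of re-sorting every iteration.
--     """
--     items: List = []
--     for color, count in dict(gems).items():
--         if count > 0 and color != "gold":
--             _insort(items, (-count, color))
--     discarded: Dict[str, int] = {}
--     while num_to_discard > 0 and items:
--         negn, color = items.pop(0)
--         discarded[color] = discarded.get(color, 0) + 1
--         num_to_discard -= 1
--         if negn + 1 < 0:
--             _insort(items, (negn + 1, color))
--     return discarded
-- ===== Notes on version B (the rewrite author's own statement) =====
-- stated objective: faster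
-- what changed: Instead of rebuilding and fully re-sorting the list of candidate colors after every single discard, B builds one lex-sorted list of (-count, color) pairs once and maintains it incrementally: pop the head, decrement, and linearly re-insert the pair, which removes the per-discard sort entirely.
import Mathlib
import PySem

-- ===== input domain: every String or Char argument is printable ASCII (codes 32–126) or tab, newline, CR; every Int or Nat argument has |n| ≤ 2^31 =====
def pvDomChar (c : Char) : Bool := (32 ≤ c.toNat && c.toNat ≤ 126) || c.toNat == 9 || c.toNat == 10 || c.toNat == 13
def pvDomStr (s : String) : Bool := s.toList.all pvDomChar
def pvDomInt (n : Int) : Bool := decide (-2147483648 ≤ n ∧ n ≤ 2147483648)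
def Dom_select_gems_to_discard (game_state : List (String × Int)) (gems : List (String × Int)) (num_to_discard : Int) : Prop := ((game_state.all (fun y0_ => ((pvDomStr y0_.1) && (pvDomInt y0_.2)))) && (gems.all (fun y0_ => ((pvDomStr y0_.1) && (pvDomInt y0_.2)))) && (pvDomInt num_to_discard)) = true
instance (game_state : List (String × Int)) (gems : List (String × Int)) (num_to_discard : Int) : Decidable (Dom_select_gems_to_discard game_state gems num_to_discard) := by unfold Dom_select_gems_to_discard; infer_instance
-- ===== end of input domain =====

-- B maintains one lex-sorted list of (-count, color) pairs incrementally (pop head / linear re-insert)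
-- instead of A's full re-sort of the candidate colors after every single discard.
-- Both Pythons only mutate local data; the proved equivalence is about the return value.

-- ===== PORT A =====
-- colors = sorted([color for color, count in remaining.items() if count > 0 and color != "gold"],
--                 key=lambda color: (-remaining[color], color))
-- remaining[color] in the key is ported as getD remaining color 0: every sorted color is a key of
-- remaining, so the lookup never raises and the default is never used.
def selColorsA (rem : PySem.Dict String Int) : List String :=
  PySem.List.sorted2
    ((rem.items.filter (fun p => decide (p.2 > 0) && !(p.1 == "gold"))).map (fun p => p.1))
    (fun c => -(rem.getD c 0)) (fun c => c)

-- the while loop; num_to_discard is the fuel (it strictly decreases while positive)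
def selLoopA (disc rem : PySem.Dict String Int) (n : Int) : PySem.Dict String Int :=
  if h : 0 < n then
    match selColorsA rem with
    | [] => disc
    | c :: _ =>
      selLoopA (disc.insert c (disc.getD c 0 + 1)) (rem.insert c (rem.getD c 0 - 1)) (n - 1)
  else disc
termination_by n.toNat
decreasing_by omega

def select_gems_to_discard (game_state : List (String × Int)) (gems : List (String × Int)) (num_to_discard : Int) : List (String × Int) :=
  (selLoopA PySem.Dict.empty (PySem.Dict.ofList gems) num_to_discard).items

-- ===== PORT B =====
-- Python tuple comparison (negcount, color) < (negcount', color')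
def bLexLt (p q : Int × String) : Bool :=
  decide (p.1 < q.1) || ((p.1 == q.1) && decide (p.2 < q.2))

-- the index i found by _insort's while loop
def bFind (items : List (Int × String)) (p : Int × String) : Nat :=
  match items with
  | [] => 0
  | q :: t => if bLexLt q p then bFind t p + 1 else 0

-- _insort: items.insert(i, pair)
def bInsort (items : List (Int × String)) (p : Int × String) : List (Int × String) :=
  PySem.List.insert items ((bFind items p : Nat) : Int) p

def selLoopB (disc : PySem.Dict String Int) (items : List (Int × String)) (n : Int) : PySem.Dict String Int :=
  if h : 0 < n then
    match items with
    | [] => disc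
    | (negn, color) :: rest =>
      let items' := if negn + 1 < 0 then bInsort rest (negn + 1, color) else rest
      selLoopB (disc.insert color (disc.getD color 0 + 1)) items' (n - 1)
  else disc
termination_by n.toNat
decreasing_by omega

def select_gems_to_discard_alt (game_state : List (String × Int)) (gems : List (String × Int)) (num_to_discard : Int) : List (String × Int) :=
  let items := (PySem.Dict.ofList gems).items.foldl
    (fun acc p => if decide (p.2 > 0) && !(p.1 == "gold") then bInsort acc (-p.2, p.1) else acc) []
  (selLoopB PySem.Dict.empty items num_to_discard).items

-- ===== PRECONDITION & SPEC =====
def Spec_select_gems_to_discard (game_state : List (String × Int)) (gems : List (String × Int)) (num_to_discard : Int) (out : List (String × Int)) : Prop := out = select_gems_to_discard_alt game_state gems num_to_discard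
instance (game_state : List (String × Int)) (gems : List (String × Int)) (num_to_discard : Int) (out : List (String × Int)) : Decidable (Spec_select_gems_to_discard game_state gems num_to_discard out) := by unfold Spec_select_gems_to_discard; infer_instance

-- ===== CLAIM (what is proved, stated in full; the proofs are below) =====
def Claim_equal_select_gems_to_discard : Prop := ∀ (game_state : List (String × Int)) (gems : List (String × Int)) (num_to_discard : Int), Dom_select_gems_to_discard game_state gems num_to_discard → Spec_select_gems_to_discard game_state gems num_to_discard (select_gems_to_discard game_state gems num_to_discard)

-- ===== LEMMAS AND PROOFS =====

-- the (-count, color) pairs of the still-discardable gems, in dict order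
def pairsOf (L : List (String × Int)) : List (Int × String) :=
  (L.filter (fun p => decide (p.2 > 0) && !(p.1 == "gold"))).map (fun p => (-p.2, p.1))

def sortedLex (l : List (Int × String)) : List (Int × String) :=
  PySem.List.sorted l (fun p => (toLex p : Int ×ₗ String))

lemma bLexLt_eq (p q : Int × String) :
    bLexLt p q = decide ((toLex p : Int ×ₗ String) < toLex q) := by
  simp only [bLexLt, Prod.Lex.lt_iff]
  by_cases h1 : p.1 < q.1 <;> by_cases h2 : p.1 = q.1 <;> by_cases h3 : p.2 < q.2 <;>
    simp [h1, h2, h3]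

lemma bFind_le_length (items : List (Int × String)) (p : Int × String) :
    bFind items p ≤ items.length := by
  induction items with
  | nil => simp [bFind]
  | cons q t ih =>
    simp only [bFind, List.length_cons]
    split <;> omega

lemma bInsort_nil (p : Int × String) : bInsort [] p = [p] := by
  show PySem.List.insert [] ((0:Nat):Int) p = [p]
  rw [PySem.List.insert_natCast _ _ _ (by simp)]
  simp

lemma bInsort_cons (q : Int × String) (t : List (Int × String)) (p : Int × String) :
    bInsort (q :: t) p = if bLexLt q p then q :: bInsort t p else p :: q :: t := by
  by_cases h : bLexLt q p
  · have hle := bFind_le_length t p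
    simp only [bInsort, bFind, h, if_pos]
    rw [PySem.List.insert_natCast _ _ _ (by simp; omega),
        PySem.List.insert_natCast _ _ _ (by omega)]
    simp [List.take_succ_cons, List.drop_succ_cons]
  · simp only [bInsort, bFind, h, if_neg, Bool.false_eq_true, not_false_iff, if_false]
    rw [PySem.List.insert_natCast _ _ _ (by simp)]
    simp

lemma bInsort_eq_insertBy (items : List (Int × String)) (p : Int × String) (hp : p ∉ items) :
    bInsort items p
      = PySem.List.insertBy (fun a b => decide ((toLex a : Int ×ₗ String) < toLex b)) p items := by
  induction items with
  | nil => rw [bInsort_nil, PySem.List.insertBy.eq_1]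
  | cons q t ih =>
    have hpq : p ≠ q := fun he => hp (he ▸ List.mem_cons_self)
    rw [bInsort_cons, PySem.List.insertBy.eq_2]
    by_cases h : bLexLt q p
    · have hlt : (toLex q : Int ×ₗ String) < toLex p :=
        of_decide_eq_true ((bLexLt_eq q p).symm.trans h)
      have hn : decide ((toLex p : Int ×ₗ String) < toLex q) = false :=
        decide_eq_false (not_lt_of_gt hlt)
      rw [if_pos h, ih (fun hm => hp (List.mem_cons_of_mem q hm))]
      simp [hn]
    · have hnlt : ¬ ((toLex q : Int ×ₗ String) < toLex p) := by
        intro hl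
        exact h ((bLexLt_eq q p).trans (decide_eq_true hl))
      have hne : (toLex p : Int ×ₗ String) ≠ toLex q := fun he => hpq (by simpa using congrArg ofLex he)
      have hlt : (toLex p : Int ×ₗ String) < toLex q := (lt_or_gt_of_ne hne).resolve_right hnlt
      rw [if_neg h]
      simp [hlt]

-- strictness upgrade: pairwise-≤ plus distinct second components gives pairwise-<
lemma pairwise_lt_of_pairwise_le_nodup (l : List (Int × String))
    (hle : l.Pairwise (fun a b => (toLex a : Int ×ₗ String) ≤ toLex b))
    (hnd : (l.map (fun p => p.2)).Nodup) :
    l.Pairwise (fun a b => (toLex a : Int ×ₗ String) < toLex b) := by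
  have hne : l.Pairwise (fun a b : Int × String => a.2 ≠ b.2) := List.pairwise_map.mp hnd
  exact (hle.and hne).imp (fun {a b} h => lt_of_le_of_ne h.1 (by
    intro he
    exact h.2 (congrArg (fun x : Int ×ₗ String => (ofLex x).2) he)))

lemma nodup_snd_sortedLex (l : List (Int × String)) (h : (l.map (fun p => p.2)).Nodup) :
    ((sortedLex l).map (fun p => p.2)).Nodup := by
  exact ((PySem.List.sorted_perm l (fun p => (toLex p : Int ×ₗ String)) false).map
    (fun p => p.2)).nodup_iff.mpr h

lemma pairwise_lt_sortedLex (l : List (Int × String)) (h : (l.map (fun p => p.2)).Nodup) :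
    (sortedLex l).Pairwise (fun a b => (toLex a : Int ×ₗ String) < toLex b) := by
  exact pairwise_lt_of_pairwise_le_nodup _
    (PySem.List.sorted_pairwise l (fun p => (toLex p : Int ×ₗ String)))
    (nodup_snd_sortedLex l h)

lemma nodup_snd_pairsOf (L : List (String × Int)) (h : (L.map (fun p => p.1)).Nodup) :
    ((pairsOf L).map (fun p => p.2)).Nodup := by
  have he : (pairsOf L).map (fun p => p.2)
      = (L.filter (fun p => decide (p.2 > 0) && !(p.1 == "gold"))).map (fun p => p.1) := by
    simp [pairsOf]
  rw [he]
  exact ((List.filter_sublist (l := L)).map (fun p => p.1)).nodup h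

-- dict lookup of a mem of items (unique keys)
lemma get?_of_mem_items (L : List (String × Int)) (c : String) (v : Int) :
    (L.map (fun p => p.1)).Nodup → (c, v) ∈ L → (PySem.Dict.mk L).get? c = some v := by
  induction L with
  | nil => intro _ hm; simp at hm
  | cons q t ih =>
    intro hnd hm
    obtain ⟨k0, v0⟩ := q
    have hnd' : k0 ∉ t.map (fun p => p.1) ∧ (t.map (fun p => p.1)).Nodup := by
      simpa using hnd
    rw [PySem.Dict.get?_mk_cons]
    rcases List.mem_cons.mp hm with he | hmt
    · obtain ⟨h1, h2⟩ := Prod.mk.injEq .. ▸ he.symm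
      simp [h1, h2]
    · have hk : k0 ≠ c := fun hk => hnd'.1 (hk ▸ List.mem_map.mpr ⟨(c, v), hmt, rfl⟩)
      rw [if_neg (by simpa using hk)]
      exact ih hnd'.2 hmt

lemma getD_of_mem_items (L : List (String × Int)) (c : String) (v : Int)
    (hnd : (L.map (fun p => p.1)).Nodup) (hm : (c, v) ∈ L) :
    (PySem.Dict.mk L).getD c 0 = v := by
  simp [PySem.Dict.getD, get?_of_mem_items L c v hnd hm]

-- sorted2 with identity second key is sorted by the lexicographic key
lemma sorted2_eq_sorted_lex (xs : List String) (k1 : String → Int) :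
    PySem.List.sorted2 xs k1 (fun c => c)
      = PySem.List.sorted xs (fun c => (toLex (k1 c, c) : Int ×ₗ String)) := by
  have hb : (fun a b : String => decide (k1 a < k1 b) || (!decide (k1 b < k1 a) && decide (a < b)))
      = fun a b : String => decide ((toLex (k1 a, a) : Int ×ₗ String) < toLex (k1 b, b)) := by
    funext a b
    rcases lt_trichotomy (k1 a) (k1 b) with h | h | h
    · simp [h, Prod.Lex.lt_iff]
    · simp [h, Prod.Lex.lt_iff]
    · simp [h, not_lt_of_gt h, ne_of_gt h, Prod.Lex.lt_iff]
  rw [PySem.List.sorted_eq_foldl_insertBy]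
  simp only [PySem.List.sorted2, Bool.false_eq_true, ite_false]
  rw [hb]

-- A's recomputed color list is the second projection of the maintained sorted pair list
lemma colorsA_eq (rem : PySem.Dict String Int) (hnd : rem.keys.Nodup) :
    selColorsA rem = (sortedLex (pairsOf rem.items)).map (fun p => p.2) := by
  obtain ⟨L⟩ := rem
  have hndi : (L.map (fun p => p.1)).Nodup := by simpa [PySem.Dict.keys] using hnd
  unfold selColorsA
  rw [sorted2_eq_sorted_lex]
  apply PySem.List.sorted_eq_of_perm_of_pairwise_lt
  · have h1 := (PySem.List.sorted_perm (pairsOf L) (fun p => (toLex p : Int ×ₗ String)) false).map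
      (fun p => p.2)
    have h2 : (pairsOf L).map (fun p => p.2)
        = (L.filter (fun p => decide (p.2 > 0) && !(p.1 == "gold"))).map (fun p => p.1) := by
      simp [pairsOf]
    rw [h2] at h1
    exact h1
  · have hlt := pairwise_lt_sortedLex _ (nodup_snd_pairsOf L hndi)
    have hK : ∀ p ∈ sortedLex (pairsOf L),
        (toLex (-((PySem.Dict.mk L).getD p.2 0), p.2) : Int ×ₗ String) = toLex p := by
      intro p hp
      have hp' : p ∈ pairsOf L := (PySem.List.mem_sorted ..).mp hp
      simp only [pairsOf, List.mem_map, List.mem_filter] at hp'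
      obtain ⟨q, ⟨hqm, _⟩, hpq⟩ := hp'
      subst hpq
      rw [getD_of_mem_items L q.1 q.2 hndi hqm]
    rw [List.pairwise_map]
    refine List.Pairwise.imp_of_mem ?_ hlt
    intro a b ha hb hab
    show (toLex (-((PySem.Dict.mk L).getD a.2 0), a.2) : Int ×ₗ String) < toLex (-((PySem.Dict.mk L).getD b.2 0), b.2)
    rw [hK a ha, hK b hb]
    exact hab

lemma pairsOf_cons (q : String × Int) (t : List (String × Int)) :
    pairsOf (q :: t)
      = (if decide (q.2 > 0) && !(q.1 == "gold") then [(-q.2, q.1)] else []) ++ pairsOf t := by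
  simp only [pairsOf, List.filter_cons]
  split <;> simp

-- updating the single entry of key c rewrites pairsOf in place
lemma pairsOf_update (L : List (String × Int)) (c : String) (v w : Int)
    (hnd : (L.map (fun p => p.1)).Nodup) (hm : (c, v) ∈ L) (hv : 0 < v)
    (hc : (c == "gold") = false) :
    ∃ pre suf, pairsOf L = pre ++ (-v, c) :: suf ∧
      pairsOf (L.map (fun p => if p.1 == c then (c, w) else p))
        = pre ++ (if 0 < w then [(-w, c)] else []) ++ suf := by
  induction L with
  | nil => simp at hm
  | cons q t ih =>
    have hnd' : q.1 ∉ t.map (fun p => p.1) ∧ (t.map (fun p => p.1)).Nodup := by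
      simpa using hnd
    by_cases hq : q.1 = c
    · have hqc : q = (c, v) := by
        rcases List.mem_cons.mp hm with he | hmt
        · exact he.symm
        · exact absurd (List.mem_map.mpr ⟨(c, v), hmt, rfl⟩) (hq ▸ hnd'.1)
      have hid : t.map (fun p => if p.1 == c then (c, w) else p) = t := by
        apply List.map_congr_left ?_ |>.trans (List.map_id t)
        intro p hp
        have : p.1 ≠ c := fun he => (hq ▸ hnd'.1) (he ▸ List.mem_map.mpr ⟨p, hp, rfl⟩)
        simp [this]
      refine ⟨[], pairsOf t, ?_, ?_⟩
      · rw [pairsOf_cons, hqc]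
        simp [hv, hc]
      · rw [List.map_cons, hid]
        have hqw : (if q.1 == c then (c, w) else q) = (c, w) := by simp [hq]
        rw [hqw, pairsOf_cons]
        by_cases hw : 0 < w <;> simp [hw, hc]
    · have hmt : (c, v) ∈ t := by
        rcases List.mem_cons.mp hm with he | hmt
        · exact absurd (congrArg Prod.fst he.symm) hq
        · exact hmt
      obtain ⟨pre, suf, h1, h2⟩ := ih hnd'.2 hmt
      have hqu : (if q.1 == c then (c, w) else q) = q := by simp [hq]
      refine ⟨(if decide (q.2 > 0) && !(q.1 == "gold") then [(-q.2, q.1)] else []) ++ pre, suf, ?_, ?_⟩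
      · rw [pairsOf_cons, h1, List.append_assoc]
      · rw [List.map_cons, hqu, pairsOf_cons, h2]
        simp [List.append_assoc]

-- the crux: one decrement step re-sorts to exactly B's pop-and-reinsert
lemma step_sortedLex (rem : PySem.Dict String Int) (hnd : rem.keys.Nodup)
    (negn : Int) (c : String) (rest : List (Int × String))
    (hs : sortedLex (pairsOf rem.items) = (negn, c) :: rest) :
    sortedLex (pairsOf (rem.insert c (rem.getD c 0 - 1)).items)
      = if negn + 1 < 0 then bInsort rest (negn + 1, c) else rest := by
  obtain ⟨L⟩ := rem
  have hndi : (L.map (fun p => p.1)).Nodup := by simpa [PySem.Dict.keys] using hnd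
  -- unpack the head pair
  have hmemp : (negn, c) ∈ pairsOf L := by
    have : (negn, c) ∈ sortedLex (pairsOf L) := hs ▸ List.mem_cons_self
    exact (PySem.List.mem_sorted ..).mp this
  have hq : ∃ v : Int, (c, v) ∈ L ∧ negn = -v ∧ 0 < v ∧ (c == "gold") = false := by
    simp only [pairsOf, List.mem_map, List.mem_filter] at hmemp
    obtain ⟨⟨qc, qv⟩, ⟨hqm, hcond⟩, hpq⟩ := hmemp
    obtain ⟨h1, h2⟩ := Prod.mk.injEq .. ▸ hpq
    subst h2
    simp only [Bool.and_eq_true, decide_eq_true_eq, Bool.not_eq_eq_eq_not, Bool.not_true] at hcond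
    refine ⟨qv, hqm, h1.symm, by omega, by simpa using hcond.2⟩
  obtain ⟨v, hmv, hnegn, hv, hgold⟩ := hq
  subst hnegn
  have hgetD : (PySem.Dict.mk L).getD c 0 = v := getD_of_mem_items L c v hndi hmv
  have hcont : (PySem.Dict.mk L).contains c = true := by
    refine (PySem.Dict.contains_iff_mem_keys ..).mpr ?_
    simp only [PySem.Dict.keys, List.mem_map]
    exact ⟨(c, v), hmv, rfl⟩
  have hitems : ((PySem.Dict.mk L).insert c ((PySem.Dict.mk L).getD c 0 - 1)).items
      = L.map (fun p => if p.1 == c then (c, v - 1) else p) := by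
    rw [hgetD, PySem.Dict.items_insert_of_contains _ _ hcont]
  obtain ⟨pre, suf, h1, h2⟩ := pairsOf_update L c v (v - 1) hndi hmv hv hgold
  -- rest is a permutation of pre ++ suf
  have hperm0 : (((-v, c) : Int × String) :: rest).Perm (pre ++ (-v, c) :: suf) := by
    have h0 : (sortedLex (pairsOf L)).Perm (pairsOf L) := PySem.List.sorted_perm ..
    rw [hs, h1] at h0
    exact h0
  have hrest : rest.Perm (pre ++ suf) := by
    have h3 : (((-v, c) : Int × String) :: rest).Perm ((-v, c) :: (pre ++ suf)) :=
      hperm0.trans List.perm_middle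
    exact h3.cons_inv
  -- nodup / order facts about rest
  have hndsnd := nodup_snd_sortedLex (pairsOf L) (nodup_snd_pairsOf L hndi)
  rw [hs] at hndsnd
  have hcrest : c ∉ rest.map (fun p => p.2) ∧ (rest.map (fun p => p.2)).Nodup := by
    simpa using hndsnd
  have hltsort := pairwise_lt_sortedLex (pairsOf L) (nodup_snd_pairsOf L hndi)
  rw [hs] at hltsort
  have hltrest : rest.Pairwise (fun a b => (toLex a : Int ×ₗ String) < toLex b) :=
    (List.pairwise_cons.mp hltsort).2
  rw [hitems]
  by_cases hw : -v + 1 < 0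
  · have hwpos : 0 < v - 1 := by omega
    rw [if_pos hw, h2, if_pos hwpos, show (-(v - 1) : Int) = -v + 1 from by omega,
        List.append_assoc, List.singleton_append]
    have hne : ((-v + 1, c) : Int × String) ∉ rest :=
      fun hmem => hcrest.1 (List.mem_map.mpr ⟨(-v + 1, c), hmem, rfl⟩)
    unfold sortedLex
    apply PySem.List.sorted_eq_of_perm_of_pairwise_lt
    · rw [bInsort_eq_insertBy _ _ hne]
      refine (PySem.List.insertBy_perm _ _ _).trans ?_
      exact (hrest.cons _).trans List.perm_middle.symm
    · have hle : (bInsort rest (-v + 1, c)).Pairwise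
          (fun a b => (toLex a : Int ×ₗ String) ≤ toLex b) := by
        rw [bInsort_eq_insertBy _ _ hne]
        exact PySem.List.insertBy_pairwise_le (fun p => (toLex p : Int ×ₗ String)) _ _
          (hltrest.imp (fun h => le_of_lt h))
      refine pairwise_lt_of_pairwise_le_nodup _ hle ?_
      have hp : (bInsort rest (-v + 1, c)).Perm ((-v + 1, c) :: rest) := by
        rw [bInsort_eq_insertBy _ _ hne]; exact PySem.List.insertBy_perm _ _ _
      refine (hp.map (fun p => p.2)).nodup_iff.mpr ?_
      simpa using hndsnd
  · have hwneg : ¬ (0 < v - 1) := by omega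
    rw [if_neg hw, h2, if_neg hwneg]
    unfold sortedLex
    apply PySem.List.sorted_eq_of_perm_of_pairwise_lt
    · simpa using hrest
    · exact hltrest

-- fold-filter fusion for B's initial build
lemma foldl_if_filter_map (L : List (String × Int)) (acc : List (Int × String)) :
    L.foldl (fun acc p => if decide (p.2 > 0) && !(p.1 == "gold") then bInsort acc (-p.2, p.1) else acc) acc
      = (pairsOf L).foldl (fun acc p => bInsort acc p) acc := by
  induction L generalizing acc with
  | nil => rfl
  | cons q t ih =>
    rw [List.foldl_cons, pairsOf_cons]
    by_cases hc : (decide (q.2 > 0) && !(q.1 == "gold")) = true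
    · rw [if_pos hc, if_pos hc, ih]
      rfl
    · rw [if_neg hc, if_neg hc, ih]
      rfl

lemma foldl_bInsort_eq_insertBy (l : List (Int × String)) :
    ∀ acc, (∀ x ∈ acc, ∀ y ∈ l, x.2 ≠ y.2) → (l.map (fun p => p.2)).Nodup →
    l.foldl (fun acc p => bInsort acc p) acc
      = l.foldl (fun acc p =>
          PySem.List.insertBy (fun a b => decide ((toLex a : Int ×ₗ String) < toLex b)) p acc) acc := by
  induction l with
  | nil => intro acc _ _; rfl
  | cons p t ih =>
    intro acc hfresh hnd
    have hnd' : p.2 ∉ t.map (fun q => q.2) ∧ (t.map (fun q => q.2)).Nodup := by simpa using hnd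
    have hpacc : p ∉ acc := fun hm => hfresh p hm p List.mem_cons_self rfl
    rw [List.foldl_cons, List.foldl_cons, bInsort_eq_insertBy acc p hpacc]
    apply ih
    · intro x hx y hy
      rcases (PySem.List.mem_insertBy _ _ _ _).mp hx with he | hxa
      · subst he
        exact fun hxy => hnd'.1 (hxy ▸ List.mem_map.mpr ⟨y, hy, rfl⟩)
      · exact hfresh x hxa y (List.mem_cons_of_mem p hy)
    · exact hnd'.2

lemma foldl_bInsort_eq_sortedLex (l : List (Int × String)) (h : (l.map (fun p => p.2)).Nodup) :
    l.foldl (fun acc p => bInsort acc p) [] = sortedLex l := by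
  rw [foldl_bInsort_eq_insertBy l [] (by simp) h]
  exact (PySem.List.sorted_eq_foldl_insertBy l (fun p => (toLex p : Int ×ₗ String))).symm

-- the two loops agree whenever B's list is the sorted pair list of A's remaining dict
lemma loop_eq_aux (k : Nat) : ∀ (n : Int), n.toNat = k → ∀ (disc rem : PySem.Dict String Int),
    rem.keys.Nodup → selLoopA disc rem n = selLoopB disc (sortedLex (pairsOf rem.items)) n := by
  induction k using Nat.strong_induction_on with
  | _ k ih =>
    intro n hk disc rem hnd
    rw [selLoopA.eq_def, selLoopB.eq_def]
    by_cases h0 : 0 < n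
    · rw [dif_pos h0, dif_pos h0, colorsA_eq rem hnd]
      cases hsl : sortedLex (pairsOf rem.items) with
      | nil => simp
      | cons p rest =>
        obtain ⟨negn, c⟩ := p
        simp only [List.map_cons]
        have hstep := step_sortedLex rem hnd negn c rest hsl
        rw [← hstep]
        exact ih (n - 1).toNat (by omega) (n - 1) rfl _ _
          (PySem.Dict.nodup_keys_insert rem c (rem.getD c 0 - 1) hnd)
    · rw [dif_neg h0, dif_neg h0]

lemma loop_eq (n : Int) (disc rem : PySem.Dict String Int) (hnd : rem.keys.Nodup) :
    selLoopA disc rem n = selLoopB disc (sortedLex (pairsOf rem.items)) n :=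
  loop_eq_aux n.toNat n rfl disc rem hnd

-- ===== VERDICT (by name: the statement is the Claim_ definition above) =====
theorem select_gems_to_discard_spec : Claim_equal_select_gems_to_discard := by
  intro gs gems n _
  unfold Spec_select_gems_to_discard select_gems_to_discard select_gems_to_discard_alt
  have hnd := PySem.Dict.nodup_keys_ofList (κ := String) (ν := Int) gems
  rw [foldl_if_filter_map, foldl_bInsort_eq_sortedLex, loop_eq n _ _ hnd]
  · exact nodup_snd_pairsOf _ hnd
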